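-- pv_equiv track=rewrite | github.com/rhsdevelop/cfa | base.py | num_brasil
-- ===== SOURCE A (Python) =====
-- def num_brasil(valor):
--     numero = valor.split('.')
--     ts = 0
--     milhar = numero[0]
--     acum = ''
--     while not ts:
--         num = milhar[-3:] + acum
--         if len(milhar) > 3:
--             acum = '.' + milhar[-3:] + acum
--             milhar = milhar[:-3]
--         else:
--             ts = 1
--     if len(numero[1]) == 1:
--         numero[1] += '0'
--     final = num + ',' + numero[1]
--     return final
-- ===== SOURCE B (Python) =====
-- def num_brasil(valor):
--     numero = valor.split('.')
--     inteiro = numero[0]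
--     n = len(inteiro)
--     r = n % 3
--     parts = ([inteiro[:r]] if r else []) + [inteiro[i:i + 3] for i in range(r, n, 3)]
--     num = '.'.join(parts)
--     dec = numero[1]
--     if len(dec) == 1:
--         dec += '0'
--     return num + ',' + dec
-- ===== Notes on version B (the rewrite author's own statement) =====
-- stated objective: simpler
-- what changed: Replaces the reverse tail-stripping while-loop (with its acum accumulator and ts flag) by a single forward pass: compute r = n % 3 and build the groups directly as the r-prefix plus the 3-char slices at indices range(r, n, 3), then join them with the thousands separator.
import Mathlib
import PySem

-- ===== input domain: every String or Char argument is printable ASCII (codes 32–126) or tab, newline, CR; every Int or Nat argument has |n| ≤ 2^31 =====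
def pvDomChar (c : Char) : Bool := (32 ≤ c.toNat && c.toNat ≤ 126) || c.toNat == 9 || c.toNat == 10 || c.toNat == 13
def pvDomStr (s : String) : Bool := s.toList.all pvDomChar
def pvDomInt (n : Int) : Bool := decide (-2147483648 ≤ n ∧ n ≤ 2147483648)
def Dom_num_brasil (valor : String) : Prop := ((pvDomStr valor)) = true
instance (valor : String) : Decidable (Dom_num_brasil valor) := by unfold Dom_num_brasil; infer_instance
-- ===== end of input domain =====

-- B replaces A's reverse tail-stripping while-loop by a forward index-arithmetic grouping
-- (prefix of length n%3, then 3-char slices joined with '.'); decimal handling unchanged.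

-- ===== PORT A =====
-- the 'while not ts' loop: num = milhar[-3:] + acum; strip 3 chars off the tail while len > 3
def numBrasilLoopA (milhar acum : List Char) : List Char :=
  let num := PySem.List.slice milhar (some (-3)) none ++ acum
  if 3 < milhar.length then
    numBrasilLoopA (PySem.List.slice milhar none (some (-3)))
      ('.' :: (PySem.List.slice milhar (some (-3)) none ++ acum))
  else num
termination_by milhar.length
decreasing_by
  rw [PySem.List.slice_to_neg_ofNat milhar 3 (by norm_num)]
  simp only [List.length_take]
  omega

def num_brasil (valor : String) : String :=
  let numero := PySem.Chars.splitOn valor.toList ['.']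
  let milhar := PySem.List.pyGetD numero 0 []
  let num := numBrasilLoopA milhar []
  match numero[1]? with
  | none => ""   -- Python raises IndexError here (no '.'); excluded by Pre_num_brasil
  | some d1 =>
      let d1' := if d1.length = 1 then d1 ++ ['0'] else d1
      String.ofList (num ++ [','] ++ d1')

-- ===== PORT B =====
-- forward grouping: ([inteiro[:r]] if r else []) + [inteiro[i:i+3] for i in range(r, n, 3)]
-- with n = len(inteiro), r = n % 3 written inline
def numBrasilParts (inteiro : List Char) : List (List Char) :=
  (if inteiro.length % 3 ≠ 0 then [inteiro.take (inteiro.length % 3)] else []) ++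
    (PySem.List.pyRange ((inteiro.length % 3 : Nat) : Int) ((inteiro.length : Nat) : Int) 3).map
      (fun i => PySem.List.slice inteiro (some i) (some (i + 3)))

def num_brasil_alt (valor : String) : String :=
  let numero := PySem.Chars.splitOn valor.toList ['.']
  let inteiro := PySem.List.pyGetD numero 0 []
  let num := PySem.Chars.join ['.'] (numBrasilParts inteiro)
  match numero[1]? with
  | none => ""   -- Python raises IndexError here (no '.'); excluded by Pre_num_brasil
  | some dec =>
      let dec' := if dec.length = 1 then dec ++ ['0'] else dec
      String.ofList (num ++ [','] ++ dec')

-- ===== PRECONDITION & SPEC =====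
-- Pre_ excludes strings without a '.', on which the Python A (numero[1]) raises IndexError.
def Pre_num_brasil (valor : String) : Prop := PySem.Str.isIn "." valor = true
instance (valor : String) : Decidable (Pre_num_brasil valor) := by unfold Pre_num_brasil; infer_instance

def pvWitness_num_brasil : String := "1234567.5"

def Spec_num_brasil (valor : String) (out : String) : Prop := out = num_brasil_alt valor
instance (valor : String) (out : String) : Decidable (Spec_num_brasil valor out) := by unfold Spec_num_brasil; infer_instance

-- ===== CLAIM (what is proved, stated in full; the proofs are below) =====
def Claim_equal_num_brasil : Prop := ∀ (valor : String), Dom_num_brasil valor → Pre_num_brasil valor → Spec_num_brasil valor (num_brasil valor)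

-- ===== LEMMAS AND PROOFS =====

lemma join_append_singleton (sep y : List Char) :
    ∀ (xs : List (List Char)), xs ≠ [] →
    PySem.Chars.join sep (xs ++ [y]) = PySem.Chars.join sep xs ++ sep ++ y
  | [], h => absurd rfl h
  | [a], _ => by
      simp [PySem.Chars.join_cons_cons, PySem.Chars.join_singleton]
  | a :: b :: t, _ => by
      have := join_append_singleton sep y (b :: t) (by simp)
      simp only [List.cons_append, PySem.Chars.join_cons_cons] at *
      simp [this]

lemma pyRange3_snoc (r n : Int) (hd : (3 : Int) ∣ n - r) (hr : r ≤ n - 3) :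
    PySem.List.pyRange r n 3 = PySem.List.pyRange r (n - 3) 3 ++ [n - 3] := by
  obtain ⟨q, hq⟩ := hd
  have hq1 : 1 ≤ q := by omega
  rw [PySem.List.pyRange_of_pos _ _ (by norm_num), PySem.List.pyRange_of_pos _ _ (by norm_num)]
  have h2 : (if r < n then ((n - r + 3 - 1) / 3).toNat else 0) = q.toNat := by
    rw [if_pos (by omega)]
    omega
  have h3 : (if r < n - 3 then ((n - 3 - r + 3 - 1) / 3).toNat else 0) = q.toNat - 1 := by
    by_cases h : r < n - 3
    · rw [if_pos h]; omega
    · rw [if_neg h]; omega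
  rw [h2, h3]
  have h4 : q.toNat = (q.toNat - 1) + 1 := by omega
  rw [h4, List.range_succ, List.map_append]
  congr 1
  simp only [List.map_cons, List.map_nil]
  have he : r + 3 * ((q.toNat - 1 : Nat) : Int) = n - 3 := by omega
  rw [he]

lemma parts_snoc (m : List Char) (h : 3 < m.length) :
    numBrasilParts m
      = numBrasilParts (m.take (m.length - 3)) ++ [m.drop (m.length - 3)] := by
  have hr3 : m.length % 3 < 3 := Nat.mod_lt _ (by norm_num)
  have hrle : m.length % 3 + 3 ≤ m.length := by omega
  unfold numBrasilParts
  have hlen : (m.take (m.length - 3)).length = m.length - 3 := by simp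
  rw [hlen]
  have hmod : (m.length - 3) % 3 = m.length % 3 := by omega
  rw [hmod]
  have htt : (m.take (m.length - 3)).take (m.length % 3) = m.take (m.length % 3) := by
    rw [List.take_take]
    congr 1
    omega
  rw [htt]
  have hcast : ((m.length - 3 : Nat) : Int) = (m.length : Int) - 3 := by omega
  have hsnoc : PySem.List.pyRange ((m.length % 3 : Nat) : Int) ((m.length : Nat) : Int) 3
      = PySem.List.pyRange ((m.length % 3 : Nat) : Int) (((m.length : Nat) : Int) - 3) 3
        ++ [((m.length : Nat) : Int) - 3] := by
    apply pyRange3_snoc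
    · omega
    · omega
  rw [hsnoc, List.map_append, hcast]
  have hlast : PySem.List.slice m (some ((m.length : Int) - 3))
      (some (((m.length : Int) - 3) + 3)) = m.drop (m.length - 3) := by
    rw [← hcast]
    have : ((m.length - 3 : Nat) : Int) + 3 = ((m.length : Nat) : Int) := by omega
    rw [this, PySem.List.slice_natCast]
    calc (m.drop (m.length - 3)).take (m.length - (m.length - 3))
        = (m.drop (m.length - 3)).take 3 := by congr 1; omega
      _ = m.drop (m.length - 3) := List.take_of_length_le (by simp; omega)
  simp only [List.map_cons, List.map_nil, hlast]
  rw [List.append_assoc]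
  congr 2
  apply List.map_congr_left
  intro i hi
  rw [PySem.List.mem_pyRange_iff_of_pos (by norm_num)] at hi
  obtain ⟨hi1, hi2, hi3⟩ := hi
  have h0i : 0 ≤ i := le_trans (by positivity) hi1
  have hi6 : i ≤ (m.length : Int) - 6 := by
    obtain ⟨a, ha⟩ := hi3
    omega
  have hsl : ∀ (xs : List Char), PySem.List.slice xs (some i) (some (i + 3))
      = (xs.drop i.toNat).take 3 := by
    intro xs
    rw [PySem.List.slice_toNat _ h0i (by omega)]
    congr 1
    omega
  rw [hsl, hsl]
  rw [List.drop_take, List.take_take]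
  congr 1
  omega

lemma parts_ne_nil (m : List Char) (h : m ≠ []) : numBrasilParts m ≠ [] := by
  unfold numBrasilParts
  have hl : 0 < m.length := List.length_pos_iff.mpr h
  by_cases hr : m.length % 3 = 0
  · have hmem : ((m.length % 3 : Nat) : Int) ∈
        PySem.List.pyRange ((m.length % 3 : Nat) : Int) ((m.length : Nat) : Int) 3 := by
      rw [PySem.List.mem_pyRange_iff_of_pos (by norm_num)]
      refine ⟨le_rfl, by omega, by omega⟩
    intro hcon
    rw [List.append_eq_nil_iff] at hcon
    have := List.mem_map_of_mem (f := fun i => PySem.List.slice m (some i) (some (i + 3))) hmem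
    rw [hcon.2] at this
    exact absurd this (List.not_mem_nil)
  · simp [hr]

lemma join_parts_small (m : List Char) (h : m.length ≤ 3) :
    PySem.Chars.join ['.'] (numBrasilParts m) = m := by
  rcases m with _ | ⟨a, _ | ⟨b, _ | ⟨c, _ | ⟨d, t⟩⟩⟩⟩
  · simp [numBrasilParts, PySem.List.pyRange_of_pos (s := 3) _ _ (by norm_num),
      PySem.Chars.join_nil]
  · simp [numBrasilParts, PySem.List.pyRange_of_pos (s := 3) _ _ (by norm_num),
      PySem.Chars.join_singleton]
  · simp [numBrasilParts, PySem.List.pyRange_of_pos (s := 3) _ _ (by norm_num),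
      PySem.Chars.join_singleton]
  · have h53 : ((5 : Int) / 3).toNat = 1 := by norm_num
    simp [numBrasilParts, PySem.List.pyRange_of_pos (s := 3) _ _ (by norm_num), PySem.Chars.join_singleton, PySem.List.slice_to _ (by norm_num : (0:Int) ≤ 3)]
  · simp only [List.length_cons] at h
    omega

lemma loopA_eq_join_parts : ∀ (N : Nat) (m acc : List Char), m.length ≤ N →
    numBrasilLoopA m acc = PySem.Chars.join ['.'] (numBrasilParts m) ++ acc := by
  intro N
  induction N with
  | zero =>
      intro m acc hm
      rw [numBrasilLoopA]
      have h3 : ¬ 3 < m.length := by omega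
      simp only [h3, if_false]
      rw [PySem.List.slice_from_neg_ofNat m 3 (by norm_num)]
      have : m.length - 3 = 0 := by omega
      rw [this, List.drop_zero, join_parts_small m (by omega)]
  | succ N ih =>
      intro m acc hm
      rw [numBrasilLoopA]
      by_cases h3 : 3 < m.length
      · simp only [h3, if_pos]
        rw [PySem.List.slice_to_neg_ofNat m 3 (by norm_num),
            PySem.List.slice_from_neg_ofNat m 3 (by norm_num)]
        rw [ih _ _ (by simp; omega)]
        rw [parts_snoc m h3]
        rw [join_append_singleton _ _ _ (parts_ne_nil _ (by
          intro hcon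
          have := congrArg List.length hcon
          simp at this
          omega))]
        simp
      · simp only [h3, if_false]
        rw [PySem.List.slice_from_neg_ofNat m 3 (by norm_num)]
        have : m.length - 3 = 0 := by omega
        rw [this, List.drop_zero, join_parts_small m (by omega)]

-- ===== VERDICT (by name: the statement is the Claim_ definition above) =====
theorem num_brasil_spec : Claim_equal_num_brasil := by
  intro valor _ _
  unfold Spec_num_brasil num_brasil num_brasil_alt
  cases h : (PySem.Chars.splitOn valor.toList ['.'])[1]? with
  | none => simp [h]
  | some d =>
      simp only [h]
      rw [loopA_eq_join_parts
        (PySem.List.pyGetD (PySem.Chars.splitOn valor.toList ['.']) 0 []).length _ _ le_rfl]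
      simp
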